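-- pv_equiv track=rewrite | github.com/yungommi/algorithm | programmers/level0/20230922/컨트롤제트.py | solution
-- ===== SOURCE A (Python) =====
-- def solution(s):
--     l = s.split()
--     n = []
--     for x in l:
--         if x =='Z':
--             n.pop()
--         else:
--             n.append(x)
--     answer = 0
--     for i in n:
--         answer += int(i)
--     return answer
-- ===== SOURCE B (Python) =====
-- def solution(s):
--     answer = 0
--     skip = 0
--     for tok in reversed(s.split()):
--         if tok == 'Z':
--             skip += 1
--         elif skip:
--             skip -= 1
--         else:
--             answer += int(tok)
--     return answer
-- ===== Notes on version B (the rewrite author's own statement) =====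
-- stated objective: alternative
-- what changed: B makes a single reverse pass with an integer skip-counter (no stack of strings and no second summing loop), adding each number directly unless a pending 'Z' cancels it.
import Mathlib
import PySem

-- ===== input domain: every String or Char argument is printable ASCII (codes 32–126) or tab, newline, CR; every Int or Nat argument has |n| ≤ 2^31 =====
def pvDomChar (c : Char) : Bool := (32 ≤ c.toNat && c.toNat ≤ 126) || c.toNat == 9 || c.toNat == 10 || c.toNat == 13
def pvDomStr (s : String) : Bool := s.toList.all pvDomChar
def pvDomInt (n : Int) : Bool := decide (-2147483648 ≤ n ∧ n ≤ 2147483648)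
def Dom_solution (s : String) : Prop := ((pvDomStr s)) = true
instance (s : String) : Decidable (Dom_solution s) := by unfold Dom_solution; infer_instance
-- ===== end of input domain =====

-- B replaces A's string stack + second summing loop by a single reverse pass with a skip counter; equal return values on Pre_ (no mutation is observable).

-- ===== PORT A =====
-- A: build a stack of tokens ('Z' pops, i.e. n.pop(); others are appended), then sum int() of the stack.
-- n.pop() on the empty stack raises IndexError (pop? = none): those inputs are outside Pre_; the port returns [] there.
def solution (s : String) : Int :=
  let l := PySem.Str.split₀ s
  let n := l.foldl
    (fun (n : List String) x =>
      if x == "Z" then (match PySem.List.pop? n with | some r => r.2 | none => [])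
      else n ++ [x]) []
  n.foldl (fun answer i => answer + (PySem.Int.ofStr? i).getD 0) 0

-- ===== PORT B =====
-- B: one pass over the reversed token list carrying (answer, skip); int(tok) raising ValueError is outside Pre_ (getD 0 there).
def solution_alt (s : String) : Int :=
  ((PySem.Str.split₀ s).reverse.foldl
    (fun (p : Int × Int) tok =>
      if tok == "Z" then (p.1, p.2 + 1)
      else if p.2 ≠ 0 then (p.1, p.2 - 1)
      else (p.1 + (PySem.Int.ofStr? tok).getD 0, p.2))
    ((0 : Int), (0 : Int))).1

-- ===== PRECONDITION & SPEC =====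
-- Pre_ = exactly the inputs where Python A returns: every prefix of the token list has at least as many
-- non-'Z' tokens as 'Z' tokens (else n.pop() raises IndexError), and every token that survives the
-- cancellation (no later window of tokens has an excess of 'Z') parses as a Python int (else ValueError).
def Pre_solution (s : String) : Prop :=
  (∀ k, k < (PySem.Str.split₀ s).length + 1 →
      2 * ((PySem.Str.split₀ s).take k).count "Z" ≤ k) ∧
  (∀ i, i < (PySem.Str.split₀ s).length →
      (PySem.Str.split₀ s).getD i "" ≠ "Z" →
      (∀ m, m < (PySem.Str.split₀ s).length - i →
          2 * (((PySem.Str.split₀ s).drop (i + 1)).take m).count "Z" ≤ m) →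
      (PySem.Int.ofStr? ((PySem.Str.split₀ s).getD i "")).isSome = true)
instance (s : String) : Decidable (Pre_solution s) := by unfold Pre_solution; infer_instance
def pvWitness_solution : String := "1 2 Z 30"

def Spec_solution (s : String) (out : Int) : Prop := out = solution_alt s
instance (s : String) (out : Int) : Decidable (Spec_solution s out) := by unfold Spec_solution; infer_instance

-- ===== CLAIM (what is proved, stated in full; the proofs are below) =====
def Claim_equal_solution : Prop := ∀ (s : String), Dom_solution s → Pre_solution s → Spec_solution s (solution s)

-- ===== LEMMAS AND PROOFS =====

-- B's loop step and its foldr form (foldl over the reverse = foldr over the list).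
def pvBStep (p : Int × Int) (tok : String) : Int × Int :=
  if tok == "Z" then (p.1, p.2 + 1)
  else if p.2 ≠ 0 then (p.1, p.2 - 1)
  else (p.1 + (PySem.Int.ofStr? tok).getD 0, p.2)

def pvBr (l : List String) : Int × Int := l.foldr (fun x p => pvBStep p x) (0, 0)

-- A's loop step.
def pvAStep (n : List String) (x : String) : List String :=
  if x == "Z" then (match PySem.List.pop? n with | some r => r.2 | none => [])
  else n ++ [x]

def pvSumV (m : List String) : Int := (m.map (fun i => (PySem.Int.ofStr? i).getD 0)).sum

lemma pvBr_cons (x : String) (r : List String) : pvBr (x :: r) = pvBStep (pvBr r) x := rfl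

lemma pvBStep_Z (p : Int × Int) : pvBStep p "Z" = (p.1, p.2 + 1) := rfl

lemma pvBStep_skip (p : Int × Int) (x : String) (hx : (x == "Z") = false) (hc : p.2 ≠ 0) :
    pvBStep p x = (p.1, p.2 - 1) := by
  unfold pvBStep; rw [hx]; simp [hc]

lemma pvBStep_add (p : Int × Int) (x : String) (hx : (x == "Z") = false) (hc : p.2 = 0) :
    pvBStep p x = (p.1 + (PySem.Int.ofStr? x).getD 0, p.2) := by
  unfold pvBStep; rw [hx]; simp [hc]

lemma pvSkip_nonneg : ∀ l : List String, 0 ≤ (pvBr l).2 := by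
  intro l
  induction l with
  | nil => simp [pvBr]
  | cons x r ih =>
    rw [pvBr_cons]
    by_cases hz : x = "Z"
    · subst hz; rw [pvBStep_Z]; dsimp only; omega
    · have hx : (x == "Z") = false := by simp [hz]
      by_cases hc : (pvBr r).2 ≠ 0
      · rw [pvBStep_skip _ _ hx hc]; dsimp only; omega
      · rw [pvBStep_add _ _ hx (by omega)]; dsimp only; omega

-- if the reverse pass ends with unmatched 'Z's, some prefix has an excess of 'Z' at least that large
lemma pvSkip_pos_excess : ∀ l : List String, 0 < (pvBr l).2 →
    ∃ k, k ≤ l.length ∧ (pvBr l).2 + (k : Int) ≤ 2 * (((l.take k).count "Z" : Nat) : Int) := by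
  intro l
  induction l with
  | nil => intro h; simp [pvBr] at h
  | cons x r ih =>
    intro h
    rw [pvBr_cons] at h ⊢
    by_cases hz : x = "Z"
    · subst hz
      rw [pvBStep_Z] at h ⊢
      dsimp only at h ⊢
      by_cases hc : 0 < (pvBr r).2
      · obtain ⟨k, hk, hex⟩ := ih hc
        refine ⟨k + 1, by simpa using hk, ?_⟩
        simp only [List.take_succ_cons, List.count_cons_self]
        push_cast
        omega
      · have h0 : (pvBr r).2 = 0 := le_antisymm (by omega) (pvSkip_nonneg r)
        refine ⟨1, by simp, ?_⟩
        simp [h0]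
    · have hx : (x == "Z") = false := by simp [hz]
      by_cases hc : (pvBr r).2 ≠ 0
      · rw [pvBStep_skip _ _ hx hc] at h ⊢
        dsimp only at h ⊢
        have hcpos : 0 < (pvBr r).2 := lt_of_le_of_ne (pvSkip_nonneg r) (Ne.symm hc)
        obtain ⟨k, hk, hex⟩ := ih hcpos
        refine ⟨k + 1, by simpa using hk, ?_⟩
        rw [List.take_succ_cons, List.count_cons_of_ne (by simpa using hz)]
        push_cast at hex ⊢
        omega
      · rw [pvBStep_add _ _ hx (by omega)] at h
        dsimp only at h
        omega

-- Main invariant: running A's stack loop over l starting from stack n pops (pvBr l).2 entries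
-- off the top of n and contributes (pvBr l).1 to the sum of int-values of the stack.
lemma pvMain : ∀ (l n : List String), (pvBr l).2 ≤ (n.length : Int) →
    pvSumV (l.foldl pvAStep n) =
      pvSumV (n.take (n.length - (pvBr l).2.toNat)) + (pvBr l).1 := by
  intro l
  induction l with
  | nil => intro n _; simp [pvBr, pvSumV]
  | cons x r ih =>
    intro n h
    rw [pvBr_cons] at h ⊢
    rw [List.foldl_cons]
    by_cases hz : x = "Z"
    · subst hz
      rw [pvBStep_Z] at h ⊢
      dsimp only at h ⊢
      have hr0 : 0 ≤ (pvBr r).2 := pvSkip_nonneg r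
      have hne : n ≠ [] := by
        intro hnil; rw [hnil] at h; simp at h; omega
      have hpop : pvAStep n "Z" = n.dropLast := by
        unfold pvAStep
        have : n = n.dropLast ++ [n.getLast hne] := (List.dropLast_append_getLast hne).symm
        rw [this, PySem.List.pop?_last]
        simp
      rw [hpop]
      have hlen : 1 ≤ n.length := by cases n with | nil => exact absurd rfl hne | cons _ _ => simp
      have ih' := ih n.dropLast (by rw [List.length_dropLast]; omega)
      rw [ih']
      congr 2
      rw [List.dropLast_eq_take, List.take_take]
      congr 1
      rw [List.length_take]
      omega
    · have hx : (x == "Z") = false := by simp [hz]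
      have hstep : pvAStep n x = n ++ [x] := by unfold pvAStep; rw [hx]; simp
      rw [hstep]
      by_cases hc : (pvBr r).2 ≠ 0
      · rw [pvBStep_skip _ _ hx hc] at h ⊢
        dsimp only at h ⊢
        have hcpos : 0 < (pvBr r).2 := lt_of_le_of_ne (pvSkip_nonneg r) (Ne.symm hc)
        have ih' := ih (n ++ [x]) (by simp only [List.length_append, List.length_cons, List.length_nil]; push_cast; omega)
        rw [ih']
        congr 2
        rw [List.take_append_of_le_length (by simp; omega)]
        congr 1
        simp
        omega
      · have h0 : (pvBr r).2 = 0 := by omega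
        rw [pvBStep_add _ _ hx h0] at h ⊢
        dsimp only at h ⊢
        have ih' := ih (n ++ [x]) (by simp only [List.length_append, List.length_cons, List.length_nil]; push_cast; omega)
        rw [ih']
        rw [h0]
        simp [pvSumV]
        ring

-- balancedness (Pre_'s first conjunct) forces the reverse pass to end with skip = 0
lemma pvSkip_zero_of_balanced (l : List String)
    (hb : ∀ k, k < l.length + 1 → 2 * (l.take k).count "Z" ≤ k) : (pvBr l).2 = 0 := by
  by_contra hne
  have hpos : 0 < (pvBr l).2 := lt_of_le_of_ne (pvSkip_nonneg l) (Ne.symm hne)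
  obtain ⟨k, hk, hex⟩ := pvSkip_pos_excess l hpos
  have := hb k (by omega)
  omega

-- ===== VERDICT (by name: the statement is the Claim_ definition above) =====
theorem solution_spec : Claim_equal_solution := by
  intro s _ hpre
  unfold Spec_solution solution solution_alt
  rw [List.foldl_reverse]
  have hA := PySem.List.foldl_add
    ((PySem.Str.split₀ s).foldl pvAStep [])
    (fun i => (PySem.Int.ofStr? i).getD 0) 0
  show ((PySem.Str.split₀ s).foldl pvAStep []).foldl
      (fun answer i => answer + (PySem.Int.ofStr? i).getD 0) 0
    = ((PySem.Str.split₀ s).foldr (fun x p => pvBStep p x) (0, 0)).1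
  rw [hA]
  have hskip : (pvBr (PySem.Str.split₀ s)).2 = 0 :=
    pvSkip_zero_of_balanced _ hpre.1
  have hmain := pvMain (PySem.Str.split₀ s) [] (by rw [hskip]; simp)
  simp only [pvSumV] at hmain
  simp only [List.length_nil, List.take_nil, List.map_nil, List.sum_nil, zero_add] at hmain
  rw [zero_add, hmain]
  rfl
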